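-- pv_equiv track=rewrite | github.com/akash-b-2824/lfr | 7.py | apply_instrs_to_dir
-- ===== SOURCE A (Python) =====
-- CLOCKWISE = {'n':'e','e':'s','s':'w','w':'n'}
--
-- CCW = {v:k for k,v in CLOCKWISE.items()}
--
-- OPP = {'n':'s','s':'n','e':'w','w':'e'}
--
-- def apply_instrs_to_dir(initial_dir, instrs):
--     cur = initial_dir
--     for c in instrs:
--         if c == 'R':
--             cur = CLOCKWISE.get(cur, cur)
--         elif c == 'L':
--             cur = CCW.get(cur, cur)
--         elif c == 'U':
--             cur = OPP.get(cur, cur)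
--     return cur
-- ===== SOURCE B (Python) =====
-- DIRS = ['n', 'e', 's', 'w']
--
-- def apply_instrs_to_dir(initial_dir, instrs):
--     if initial_dir not in DIRS:
--         return initial_dir
--     net = 0
--     for c in instrs:
--         if c == 'R':
--             net += 1
--         elif c == 'L':
--             net -= 1
--         elif c == 'U':
--             net += 2
--     return DIRS[(DIRS.index(initial_dir) + net) % 4]
-- ===== Notes on version B (the rewrite author's own statement) =====
-- stated objective: faster
-- what changed: Instead of stepping through three rotation dictionaries per instruction, B accumulates a single net quarter-turn count (+1 R, -1 L, +2 U) and applies it once via index arithmetic modulo 4 on a direction list.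
import Mathlib
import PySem

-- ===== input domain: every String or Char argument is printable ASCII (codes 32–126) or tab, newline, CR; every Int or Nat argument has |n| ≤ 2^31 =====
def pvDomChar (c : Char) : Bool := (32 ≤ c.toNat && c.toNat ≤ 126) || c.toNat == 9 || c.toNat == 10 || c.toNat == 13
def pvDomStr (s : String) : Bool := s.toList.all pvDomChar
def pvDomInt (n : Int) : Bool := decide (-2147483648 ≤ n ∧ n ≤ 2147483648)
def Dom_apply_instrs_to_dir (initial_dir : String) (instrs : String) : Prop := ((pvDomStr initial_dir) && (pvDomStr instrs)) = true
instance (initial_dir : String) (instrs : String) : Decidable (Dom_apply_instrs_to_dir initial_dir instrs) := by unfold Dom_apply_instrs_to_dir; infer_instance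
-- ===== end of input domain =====

-- B replaces A's three per-step dictionary lookups by a single accumulated net quarter-turn applied once modulo 4 (objective: idiomatic).

-- ===== PORT A =====
def pvCLOCKWISE : PySem.Dict String String := PySem.Dict.ofList [("n","e"),("e","s"),("s","w"),("w","n")]
-- CCW = {v:k for k,v in CLOCKWISE.items()}
def pvCCW : PySem.Dict String String := PySem.Dict.ofList [("e","n"),("s","e"),("w","s"),("n","w")]
def pvOPP : PySem.Dict String String := PySem.Dict.ofList [("n","s"),("s","n"),("e","w"),("w","e")]

def pvStepA (cur : String) (c : Char) : String :=
  if c = 'R' then (pvCLOCKWISE.get? cur).getD cur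
  else if c = 'L' then (pvCCW.get? cur).getD cur
  else if c = 'U' then (pvOPP.get? cur).getD cur
  else cur

def apply_instrs_to_dir (initial_dir : String) (instrs : String) : String :=
  instrs.toList.foldl pvStepA initial_dir

-- ===== PORT B =====
def pvDIRS : List String := ["n", "e", "s", "w"]

def pvStepB (net : Int) (c : Char) : Int :=
  if c = 'R' then net + 1
  else if c = 'L' then net - 1
  else if c = 'U' then net + 2
  else net

def apply_instrs_to_dir_alt (initial_dir : String) (instrs : String) : String :=
  match PySem.List.index? pvDIRS initial_dir with
  | none => initial_dir
  | some i =>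
    let net := instrs.toList.foldl pvStepB 0
    (PySem.List.pyGet? pvDIRS (PySem.Int.mod ((i : Int) + net) 4)).getD ""

-- ===== PRECONDITION & SPEC =====
def Spec_apply_instrs_to_dir (initial_dir : String) (instrs : String) (out : String) : Prop := out = apply_instrs_to_dir_alt initial_dir instrs
instance (initial_dir : String) (instrs : String) (out : String) : Decidable (Spec_apply_instrs_to_dir initial_dir instrs out) := by unfold Spec_apply_instrs_to_dir; infer_instance

-- ===== CLAIM (what is proved, stated in full; the proofs are below) =====
def Claim_equal_apply_instrs_to_dir : Prop := ∀ (initial_dir : String) (instrs : String), Dom_apply_instrs_to_dir initial_dir instrs → Spec_apply_instrs_to_dir initial_dir instrs (apply_instrs_to_dir initial_dir instrs)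

-- ===== LEMMAS AND PROOFS =====

-- direction at (Python-mod) index i
def pvDirAt (i : Int) : String :=
  (PySem.List.pyGet? pvDIRS (PySem.Int.mod i 4)).getD ""

def pvDelta (c : Char) : Int :=
  if c = 'R' then 1 else if c = 'L' then -1 else if c = 'U' then 2 else 0

lemma pvStepB_eq (n : Int) (c : Char) : pvStepB n c = n + pvDelta c := by
  unfold pvStepB pvDelta; split_ifs <;> ring

lemma pvDirAt_congr {i j : Int} (h : i % 4 = j % 4) : pvDirAt i = pvDirAt j := by
  unfold pvDirAt
  rw [PySem.Int.mod_eq_emod_of_pos (by norm_num : (0:Int) < 4),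
      PySem.Int.mod_eq_emod_of_pos (by norm_num : (0:Int) < 4), h]

lemma pvStepA_dirAt_small (i : Int) (h0 : 0 ≤ i) (h4 : i < 4) (c : Char) :
    pvStepA (pvDirAt i) c = pvDirAt (i + pvDelta c) := by
  interval_cases i <;>
    (by_cases hR : c = 'R' <;> by_cases hL : c = 'L' <;> by_cases hU : c = 'U' <;>
      simp_all [pvStepA, pvDelta] <;> decide)

lemma pvStepA_dirAt (i : Int) (c : Char) :
    pvStepA (pvDirAt i) c = pvDirAt (i + pvDelta c) := by
  have h1 : pvDirAt i = pvDirAt (i % 4) := pvDirAt_congr (by omega)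
  have h2 : pvDirAt (i % 4 + pvDelta c) = pvDirAt (i + pvDelta c) :=
    pvDirAt_congr (by omega)
  rw [h1, pvStepA_dirAt_small (i % 4) (Int.emod_nonneg i (by norm_num))
        (Int.emod_lt_of_pos i (by norm_num)) c, h2]

lemma pvNet_shift (cs : List Char) (a : Int) :
    cs.foldl pvStepB a = a + cs.foldl pvStepB 0 := by
  induction cs generalizing a with
  | nil => simp
  | cons c cs ih =>
    simp only [List.foldl_cons]
    rw [ih (pvStepB a c), ih (pvStepB 0 c), pvStepB_eq, pvStepB_eq]
    ring

lemma pvFoldA_dirAt (cs : List Char) (i : Int) :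
    cs.foldl pvStepA (pvDirAt i) = pvDirAt (i + cs.foldl pvStepB 0) := by
  induction cs generalizing i with
  | nil => simp
  | cons c cs ih =>
    simp only [List.foldl_cons]
    rw [pvStepA_dirAt, ih, pvNet_shift cs (pvStepB 0 c), pvStepB_eq]
    ring_nf

lemma pvStepA_notin (cur : String) (h : cur ∉ pvDIRS) (c : Char) : pvStepA cur c = cur := by
  have h1 : cur ≠ "n" := by intro e; exact h (by rw [e]; decide)
  have h2 : cur ≠ "e" := by intro e; exact h (by rw [e]; decide)
  have h3 : cur ≠ "s" := by intro e; exact h (by rw [e]; decide)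
  have h4 : cur ≠ "w" := by intro e; exact h (by rw [e]; decide)
  have e1 : pvCLOCKWISE = PySem.Dict.mk [("n","e"),("e","s"),("s","w"),("w","n")] := by decide
  have e2 : pvCCW = PySem.Dict.mk [("e","n"),("s","e"),("w","s"),("n","w")] := by decide
  have e3 : pvOPP = PySem.Dict.mk [("n","s"),("s","n"),("e","w"),("w","e")] := by decide
  unfold pvStepA
  rw [e1, e2, e3]
  simp [PySem.Dict.get?, beq_iff_eq,
    Ne.symm h1, Ne.symm h2, Ne.symm h3, Ne.symm h4]

lemma pvFoldA_notin (cs : List Char) (cur : String) (h : cur ∉ pvDIRS) :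
    cs.foldl pvStepA cur = cur := by
  induction cs with
  | nil => rfl
  | cons c cs ih => simp only [List.foldl_cons, pvStepA_notin cur h c, ih]

-- ===== VERDICT (by name: the statement is the Claim_ definition above) =====
theorem apply_instrs_to_dir_spec : Claim_equal_apply_instrs_to_dir := by
  intro initial_dir instrs _
  unfold Spec_apply_instrs_to_dir apply_instrs_to_dir apply_instrs_to_dir_alt
  cases hidx : PySem.List.index? pvDIRS initial_dir with
  | none =>
    show List.foldl pvStepA initial_dir instrs.toList = initial_dir
    exact pvFoldA_notin instrs.toList initial_dir
      ((PySem.List.index?_eq_none_iff _ _).mp hidx)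
  | some i =>
    obtain ⟨hk, hval, _⟩ := PySem.List.getElem_of_index?_eq_some hidx
    have hi4 : i < 4 := hk
    have hstart : initial_dir = pvDirAt (i : Int) := by
      interval_cases i <;> (simp [pvDIRS] at hval; subst hval; decide)
    show List.foldl pvStepA initial_dir instrs.toList =
      (PySem.List.pyGet? pvDIRS (PySem.Int.mod ((i : Int) + instrs.toList.foldl pvStepB 0) 4)).getD ""
    rw [hstart, pvFoldA_dirAt]
    rfl
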